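-- pv_equiv track=rewrite | github.com/ayiman29/BRAC-CSE221-LAB-ASSIGNMENTS-SPRING-2025 | LAB QUIZZES/CSE221_Quiz04/_412/_412_23301211.py | solve
-- ===== SOURCE A (Python) =====
-- def solve(n, initX, initY, arr):
--     m = len(arr)
--     ans = 0
--     for i in range(initX-1, initX+2):
--         for j in range(initY-1, initY+2):
--             if (i, j) not in arr and i > 0 and i < n+1 and j >0 and j < n+1 and (i, j) != (initX, initY):
--                 ans += 1
--
--     return ans
-- ===== SOURCE B (Python) =====
-- def solve(n, initX, initY, arr):
--     r = sum(1 for i in (initX - 1, initX, initX + 1) if 1 <= i <= n)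
--     c = sum(1 for j in (initY - 1, initY, initY + 1) if 1 <= j <= n)
--     slots = r * c - (1 if 1 <= initX <= n and 1 <= initY <= n else 0)
--     occupied = sum(1 for (x, y) in set(arr)
--                    if abs(x - initX) <= 1 and abs(y - initY) <= 1
--                    and 1 <= x <= n and 1 <= y <= n
--                    and (x, y) != (initX, initY))
--     return slots - occupied
-- ===== Notes on version B (the rewrite author's own statement) =====
-- stated objective: alternative
-- what changed: Replaces the 3x3 double loop with per-cell list-membership tests by a closed-form count of in-bounds neighbor slots (row count times column count minus the center) minus one pass over set(arr) counting distinct occupied eligible cells.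
import Mathlib
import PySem

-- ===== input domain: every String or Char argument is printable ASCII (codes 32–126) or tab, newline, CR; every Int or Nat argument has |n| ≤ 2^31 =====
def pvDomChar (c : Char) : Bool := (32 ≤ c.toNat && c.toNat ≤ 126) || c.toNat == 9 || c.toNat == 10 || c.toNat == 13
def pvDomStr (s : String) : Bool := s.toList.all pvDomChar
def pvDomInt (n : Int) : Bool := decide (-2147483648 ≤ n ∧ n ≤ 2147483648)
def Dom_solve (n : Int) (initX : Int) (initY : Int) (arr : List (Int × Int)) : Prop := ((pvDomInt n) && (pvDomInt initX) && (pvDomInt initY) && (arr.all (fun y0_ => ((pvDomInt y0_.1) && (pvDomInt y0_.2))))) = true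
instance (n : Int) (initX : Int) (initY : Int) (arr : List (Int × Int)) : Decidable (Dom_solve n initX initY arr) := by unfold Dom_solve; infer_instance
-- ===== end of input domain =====

-- B replaces A's 3x3 membership scan by a closed-form count of in-bounds neighbor
-- slots minus one pass over the distinct board cells (objective: alternative).

-- ===== PORT A =====
def solve (n : Int) (initX : Int) (initY : Int) (arr : List (Int × Int)) : Int :=
  let _m := arr.length
  let ans : Int := 0
  let ans := (PySem.List.pyRange (initX - 1) (initX + 2) 1).foldl (fun ans i =>
    (PySem.List.pyRange (initY - 1) (initY + 2) 1).foldl (fun ans j =>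
      if (i, j) ∉ arr ∧ 0 < i ∧ i < n + 1 ∧ 0 < j ∧ j < n + 1 ∧ (i, j) ≠ (initX, initY)
      then ans + 1 else ans) ans) ans
  ans

-- ===== PORT B =====
def solve_alt (n : Int) (initX : Int) (initY : Int) (arr : List (Int × Int)) : Int :=
  let r : Int := ([initX - 1, initX, initX + 1].countP (fun i => decide (1 ≤ i ∧ i ≤ n)) : Int)
  let c : Int := ([initY - 1, initY, initY + 1].countP (fun j => decide (1 ≤ j ∧ j ≤ n)) : Int)
  let slots : Int := r * c - (if 1 ≤ initX ∧ initX ≤ n ∧ 1 ≤ initY ∧ initY ≤ n then 1 else 0)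
  let occupied : Int := ((PySem.Set.ofList arr).countP (fun p =>
    decide (|p.1 - initX| ≤ 1 ∧ |p.2 - initY| ≤ 1 ∧
      1 ≤ p.1 ∧ p.1 ≤ n ∧ 1 ≤ p.2 ∧ p.2 ≤ n ∧ p ≠ (initX, initY))) : Int)
  slots - occupied

-- ===== PRECONDITION & SPEC =====
def Spec_solve (n : Int) (initX : Int) (initY : Int) (arr : List (Int × Int)) (out : Int) : Prop := out = solve_alt n initX initY arr
instance (n : Int) (initX : Int) (initY : Int) (arr : List (Int × Int)) (out : Int) : Decidable (Spec_solve n initX initY arr out) := by unfold Spec_solve; infer_instance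

-- ===== CLAIM (what is proved, stated in full; the proofs are below) =====
def Claim_equal_solve : Prop := ∀ (n : Int) (initX : Int) (initY : Int) (arr : List (Int × Int)), Dom_solve n initX initY arr → Spec_solve n initX initY arr (solve n initX initY arr)

-- ===== LEMMAS AND PROOFS =====

-- the 9 candidate cells around the center, row-major (the cells A's two loops visit)
def cells9 (x y : Int) : List (Int × Int) :=
  [(x-1,y-1),(x-1,y),(x-1,y+1),(x,y-1),(x,y),(x,y+1),(x+1,y-1),(x+1,y),(x+1,y+1)]

def cnt1 (P : Prop) [Decidable P] : Int := if P then 1 else 0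

theorem range3 (x : Int) : PySem.List.pyRange (x - 1) (x + 2) 1 = [x - 1, x, x + 1] := by
  rw [PySem.List.pyRange_one_cons (by omega), PySem.List.pyRange_one_cons (by omega),
      PySem.List.pyRange_one_cons (by omega), PySem.List.pyRange_one_eq_nil (by omega)]
  norm_num

theorem cells9_nodup (x y : Int) : (cells9 x y).Nodup := by
  simp [cells9, Prod.ext_iff]
  omega

theorem occEq (n x y : Int) (arr : List (Int × Int)) :
    ((PySem.Set.ofList arr).countP (fun p =>
      decide (|p.1 - x| ≤ 1 ∧ |p.2 - y| ≤ 1 ∧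
        1 ≤ p.1 ∧ p.1 ≤ n ∧ 1 ≤ p.2 ∧ p.2 ≤ n ∧ p ≠ (x, y)))) =
    ((cells9 x y).countP (fun p =>
      decide (|p.1 - x| ≤ 1 ∧ |p.2 - y| ≤ 1 ∧
        1 ≤ p.1 ∧ p.1 ≤ n ∧ 1 ≤ p.2 ∧ p.2 ≤ n ∧ p ≠ (x, y)) && decide (p ∈ arr))) := by
  rw [List.countP_eq_length_filter, List.countP_eq_length_filter]
  apply List.Perm.length_eq
  apply (List.perm_ext_iff_of_nodup
    ((PySem.Set.nodup_ofList arr).filter _) ((cells9_nodup x y).filter _)).mpr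
  intro a
  obtain ⟨i, j⟩ := a
  simp [List.mem_filter, PySem.Set.mem_ofList, cells9, Prod.ext_iff, abs_le]
  constructor
  · rintro ⟨hm, h⟩
    refine ⟨by omega, by tauto⟩
  · rintro ⟨h1, h2⟩
    tauto

theorem cnt1_mul (P Q : Prop) [Decidable P] [Decidable Q] :
    cnt1 P * cnt1 Q = cnt1 (P ∧ Q) := by
  unfold cnt1; by_cases hP : P <;> by_cases hQ : Q <;> simp [hP, hQ]

-- one non-center cell: A's term = slot indicator − occupied indicator
theorem cellEq (n x y i j : Int) (m : Prop) [Decidable m]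
    (hne : i ≠ x ∨ j ≠ y) (hbi : x - 1 ≤ i ∧ i ≤ x + 1) (hbj : y - 1 ≤ j ∧ j ≤ y + 1) :
    cnt1 (¬m ∧ 0 < i ∧ i < n + 1 ∧ 0 < j ∧ j < n + 1 ∧ (i, j) ≠ (x, y))
      = cnt1 (1 ≤ i ∧ i ≤ n) * cnt1 (1 ≤ j ∧ j ≤ n)
        - cnt1 ((|i - x| ≤ 1 ∧ |j - y| ≤ 1 ∧ 1 ≤ i ∧ i ≤ n ∧ 1 ≤ j ∧ j ≤ n ∧ (i, j) ≠ (x, y)) ∧ m) := by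
  rw [cnt1_mul]
  unfold cnt1
  have hp : (i, j) ≠ (x, y) := by simp [Prod.ext_iff]; omega
  by_cases hm : m <;> simp [hm, hp, abs_le] <;> split_ifs <;> omega

theorem ite_add_one (P : Prop) [Decidable P] (a : Int) :
    (if P then a + 1 else a) = a + cnt1 P := by
  unfold cnt1; split <;> omega

theorem countP_cons_int (p : α → Bool) (a : α) (l : List α) :
    (((a :: l).countP p : Int)) = cnt1 (p a = true) + (l.countP p : Int) := by
  rw [List.countP_cons]; unfold cnt1; split_ifs with h <;> push_cast <;> omega

theorem cnt1_dec (P : Prop) [Decidable P] : cnt1 (decide P = true) = cnt1 P := by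
  simp [cnt1]

theorem cnt1_dec_and (P Q : Prop) [Decidable P] [Decidable Q] :
    cnt1 ((decide P && decide Q) = true) = cnt1 (P ∧ Q) := by
  simp [cnt1]

theorem center_zeroA (n x y : Int) (arr : List (Int × Int)) :
    cnt1 ((x,y) ∉ arr ∧ 0 < x ∧ x < n+1 ∧ 0 < y ∧ y < n+1 ∧ (x,y) ≠ (x,y)) = 0 := by
  simp [cnt1]

theorem center_zeroB (n x y : Int) (arr : List (Int × Int)) :
    cnt1 ((|x - x| ≤ 1 ∧ |y - y| ≤ 1 ∧ 1 ≤ x ∧ x ≤ n ∧ 1 ≤ y ∧ y ≤ n ∧ (x,y) ≠ (x,y)) ∧ (x,y) ∈ arr) = 0 := by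
  simp [cnt1]

theorem center_prod (n x y : Int) :
    cnt1 (1 ≤ x ∧ x ≤ n) * cnt1 (1 ≤ y ∧ y ≤ n)
      = (if 1 ≤ x ∧ x ≤ n ∧ 1 ≤ y ∧ y ≤ n then (1:Int) else 0) := by
  rw [cnt1_mul]; unfold cnt1; split_ifs <;> tauto

theorem solve_as_cnt (n x y : Int) (arr : List (Int × Int)) :
    solve n x y arr =
      cnt1 ((x-1,y-1) ∉ arr ∧ 0 < x-1 ∧ x-1 < n+1 ∧ 0 < y-1 ∧ y-1 < n+1 ∧ (x-1,y-1) ≠ (x,y))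
    + cnt1 ((x-1,y) ∉ arr ∧ 0 < x-1 ∧ x-1 < n+1 ∧ 0 < y ∧ y < n+1 ∧ (x-1,y) ≠ (x,y))
    + cnt1 ((x-1,y+1) ∉ arr ∧ 0 < x-1 ∧ x-1 < n+1 ∧ 0 < y+1 ∧ y+1 < n+1 ∧ (x-1,y+1) ≠ (x,y))
    + cnt1 ((x,y-1) ∉ arr ∧ 0 < x ∧ x < n+1 ∧ 0 < y-1 ∧ y-1 < n+1 ∧ (x,y-1) ≠ (x,y))
    + cnt1 ((x,y) ∉ arr ∧ 0 < x ∧ x < n+1 ∧ 0 < y ∧ y < n+1 ∧ (x,y) ≠ (x,y))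
    + cnt1 ((x,y+1) ∉ arr ∧ 0 < x ∧ x < n+1 ∧ 0 < y+1 ∧ y+1 < n+1 ∧ (x,y+1) ≠ (x,y))
    + cnt1 ((x+1,y-1) ∉ arr ∧ 0 < x+1 ∧ x+1 < n+1 ∧ 0 < y-1 ∧ y-1 < n+1 ∧ (x+1,y-1) ≠ (x,y))
    + cnt1 ((x+1,y) ∉ arr ∧ 0 < x+1 ∧ x+1 < n+1 ∧ 0 < y ∧ y < n+1 ∧ (x+1,y) ≠ (x,y))
    + cnt1 ((x+1,y+1) ∉ arr ∧ 0 < x+1 ∧ x+1 < n+1 ∧ 0 < y+1 ∧ y+1 < n+1 ∧ (x+1,y+1) ≠ (x,y)) := by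
  simp only [solve, range3, List.foldl, ite_add_one]
  ring

-- ===== VERDICT (by name: the statement is the Claim_ definition above) =====
theorem solve_spec : Claim_equal_solve := by
  intro n x y arr _
  unfold Spec_solve
  simp only [solve_alt]
  rw [solve_as_cnt, occEq]
  simp only [cells9, countP_cons_int, List.countP_nil, cnt1_dec, cnt1_dec_and]
  rw [cellEq n x y (x-1) (y-1) _ (by omega) (by omega) (by omega),
      cellEq n x y (x-1) y _ (by omega) (by omega) (by omega),
      cellEq n x y (x-1) (y+1) _ (by omega) (by omega) (by omega),
      cellEq n x y x (y-1) _ (by omega) (by omega) (by omega),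
      cellEq n x y x (y+1) _ (by omega) (by omega) (by omega),
      cellEq n x y (x+1) (y-1) _ (by omega) (by omega) (by omega),
      cellEq n x y (x+1) y _ (by omega) (by omega) (by omega),
      cellEq n x y (x+1) (y+1) _ (by omega) (by omega) (by omega),
      center_zeroA, center_zeroB, ← center_prod]
  ring
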